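-- pv_equiv track=rewrite | github.com/vikrantwiz02/riscv-isa-explorer | riscv_explorer/graph.py | _cluster_label
-- ===== SOURCE A (Python) =====
-- def _cluster_label(members: list[str]) -> str:
--     """Heuristic label based on the naming pattern of cluster members."""
--     names = [m.lower() for m in members]
--     if sum(1 for n in names if n.startswith("zk") or n.startswith("zbk")) > 3:
--         return "Cryptographic"
--     if sum(1 for n in names if n.startswith("zv")) > 3:
--         return "Vector Crypto"
--     if sum(1 for n in names if n in {"i", "m", "a", "f", "d", "q", "c", "h", "v"}
--                                or n.startswith("z")) > 4:
--         return "Base + Extensions"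
--     if sum(1 for n in names if n.startswith("s")) > 2:
--         return "Supervisor/Platform"
--     return "Mixed"
-- ===== SOURCE B (Python) =====
-- def _cluster_label(members: list[str]) -> str:
--     """Heuristic label based on the naming pattern of cluster members."""
--     def bucket(m: str) -> str:
--         n = m.lower()
--         if n.startswith("zk") or n.startswith("zbk"):
--             return "K"   # crypto-prefixed (also counts toward base 'z*')
--         if n.startswith("zv"):
--             return "V"   # vector-crypto-prefixed (also counts toward base 'z*')
--         if n.startswith("z"):
--             return "Z"   # other z-extension
--         if n in {"i", "m", "a", "f", "d", "q", "c", "h", "v"}: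
--             return "L"   # base single-letter extension
--         if n.startswith("s"):
--             return "S"   # supervisor/platform
--         return "O"
--     tally = {}
--     for m in members:
--         b = bucket(m)
--         tally[b] = tally.get(b, 0) + 1
--     if tally.get("K", 0) > 3:
--         return "Cryptographic"
--     if tally.get("V", 0) > 3:
--         return "Vector Crypto"
--     if tally.get("K", 0) + tally.get("V", 0) + tally.get("Z", 0) + tally.get("L", 0) > 4:
--         return "Base + Extensions"
--     if tally.get("S", 0) > 2:
--         return "Supervisor/Platform"
--     return "Mixed"
-- ===== Notes on version B (the rewrite author's own statement) =====
-- stated objective: alternative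
-- what changed: Instead of A's four overlapping membership/prefix scans, B classifies each name once into one of six disjoint classes (K/V/Z/L/S/O) with a first-match classifier, tallies the classes in a dict, and reconstructs A's overlapping counts arithmetically from the disjoint tallies (base = K+V+Z+L) before the same threshold cascade.
import Mathlib
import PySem

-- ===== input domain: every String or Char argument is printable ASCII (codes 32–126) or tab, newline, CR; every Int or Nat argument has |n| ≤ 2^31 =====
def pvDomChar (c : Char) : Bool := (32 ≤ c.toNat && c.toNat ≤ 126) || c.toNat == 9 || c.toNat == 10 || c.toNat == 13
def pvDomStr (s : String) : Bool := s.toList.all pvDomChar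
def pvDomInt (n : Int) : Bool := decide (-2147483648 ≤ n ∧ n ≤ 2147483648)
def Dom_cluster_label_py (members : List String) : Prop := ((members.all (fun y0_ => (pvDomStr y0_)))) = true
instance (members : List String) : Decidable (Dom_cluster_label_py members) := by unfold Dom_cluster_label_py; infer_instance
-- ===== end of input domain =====

-- B partitions the names into six DISJOINT prefix classes with a first-match classifier, tallies the
-- classes in a dict, and derives each of A's overlapping counts from the class tallies (base = K+V+Z+L);
-- objective: alternative decomposition (classification + aggregation instead of four overlapping scans).

-- ===== PORT A =====
-- the four tests of A's generator sums (shared vocabulary; B's classifier uses the same literal tests)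
def pvCryptoP (n : String) : Bool := PySem.Str.startswith n "zk" || PySem.Str.startswith n "zbk"
def pvVecP (n : String) : Bool := PySem.Str.startswith n "zv"
def pvLetterP (n : String) : Bool := ["i", "m", "a", "f", "d", "q", "c", "h", "v"].contains n
def pvZP (n : String) : Bool := PySem.Str.startswith n "z"
def pvSupP (n : String) : Bool := PySem.Str.startswith n "s"

def cluster_label_py (members : List String) : String :=
  let names := members.map PySem.Str.lower
  if (names.countP pvCryptoP : Int) > 3 then "Cryptographic"
  else if (names.countP pvVecP : Int) > 3 then "Vector Crypto"
  else if (names.countP (fun n => pvLetterP n || pvZP n) : Int) > 4 then "Base + Extensions"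
  else if (names.countP pvSupP : Int) > 2 then "Supervisor/Platform"
  else "Mixed"

-- ===== PORT B =====
-- first-match classifier into disjoint classes (Source B's `bucket`)
def pvBucket (m : String) : String :=
  let n := PySem.Str.lower m
  if pvCryptoP n then "K"
  else if pvVecP n then "V"
  else if pvZP n then "Z"
  else if pvLetterP n then "L"
  else if pvSupP n then "S"
  else "O"

def cluster_label_py_alt (members : List String) : String :=
  let tally := members.foldl
    (fun d m => let b := pvBucket m; d.insert b (d.getD b 0 + 1))
    (PySem.Dict.empty : PySem.Dict String Int)
  if tally.getD "K" 0 > 3 then "Cryptographic"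
  else if tally.getD "V" 0 > 3 then "Vector Crypto"
  else if tally.getD "K" 0 + tally.getD "V" 0 + tally.getD "Z" 0 + tally.getD "L" 0 > 4 then "Base + Extensions"
  else if tally.getD "S" 0 > 2 then "Supervisor/Platform"
  else "Mixed"

-- ===== PRECONDITION & SPEC =====
def Spec_cluster_label_py (members : List String) (out : String) : Prop := out = cluster_label_py_alt members
instance (members : List String) (out : String) : Decidable (Spec_cluster_label_py members out) := by unfold Spec_cluster_label_py; infer_instance

-- ===== CLAIM (what is proved, stated in full; the proofs are below) =====
def Claim_equal_cluster_label_py : Prop := ∀ (members : List String), Dom_cluster_label_py members → Spec_cluster_label_py members (cluster_label_py members)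

-- ===== LEMMAS AND PROOFS =====
-- class exclusions / inclusions behind the disjoint partition
theorem pvCrypto_z (n : String) : pvCryptoP n = true → pvZP n = true := by
  unfold pvCryptoP pvZP PySem.Str.startswith PySem.Chars.startswith
  have e1 : "zk".toList = ['z','k'] := rfl
  have e2 : "zbk".toList = ['z','b','k'] := rfl
  have e3 : "z".toList = ['z'] := rfl
  rcases hl : n.toList with _ | ⟨a, t⟩ <;> simp [e1, e2, e3, List.isPrefixOf]
  rintro (⟨h, -⟩ | ⟨h, -⟩) <;> exact h

theorem pvVec_z (n : String) : pvVecP n = true → pvZP n = true := by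
  unfold pvVecP pvZP PySem.Str.startswith PySem.Chars.startswith
  have e1 : "zv".toList = ['z','v'] := rfl
  have e3 : "z".toList = ['z'] := rfl
  rcases hl : n.toList with _ | ⟨a, t⟩ <;> simp [e1, e3, List.isPrefixOf]
  exact fun h _ => h

theorem pvCrypto_not_vec (n : String) : pvCryptoP n = true → pvVecP n = false := by
  unfold pvCryptoP pvVecP PySem.Str.startswith PySem.Chars.startswith
  have e1 : "zk".toList = ['z','k'] := rfl
  have e2 : "zbk".toList = ['z','b','k'] := rfl
  have e3 : "zv".toList = ['z','v'] := rfl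
  rcases hl : n.toList with _ | ⟨a, _ | ⟨b, t⟩⟩ <;> simp [e1, e2, e3, List.isPrefixOf]
  rintro (⟨rfl, rfl, -⟩ | ⟨rfl, rfl, -⟩) <;> simp

theorem pvZ_not_sup (n : String) : pvZP n = true → pvSupP n = false := by
  unfold pvZP pvSupP PySem.Str.startswith PySem.Chars.startswith
  have e1 : "z".toList = ['z'] := rfl
  have e2 : "s".toList = ['s'] := rfl
  rcases hl : n.toList with _ | ⟨a, t⟩ <;> simp [e1, e2, List.isPrefixOf]
  rintro rfl ; simp

theorem pvLetter_excl (n : String) : pvLetterP n = true →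
    pvZP n = false ∧ pvCryptoP n = false ∧ pvVecP n = false ∧ pvSupP n = false := by
  unfold pvLetterP
  intro h
  simp only [List.contains_cons, List.contains_nil, Bool.or_eq_true, beq_iff_eq] at h
  rcases h with h|h|h|h|h|h|h|h|h|h <;> first | subst h ; decide | simp at h

-- the tally is the class counter of the mapped list
theorem pvTally_eq (ms : List String) :
    ms.foldl (fun d m => let b := pvBucket m; d.insert b (d.getD b 0 + 1))
      (PySem.Dict.empty : PySem.Dict String Int)
      = PySem.Dict.counter (ms.map pvBucket) := by
  rw [← PySem.Dict.foldl_insert_getD_add_one_eq_counter, List.foldl_map]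

-- each of A's four tallies in terms of the class counts
theorem pvCounts (ms : List String) :
    (ms.map pvBucket).count "K" = ms.countP (fun m => pvCryptoP (PySem.Str.lower m))
    ∧ (ms.map pvBucket).count "V" = ms.countP (fun m => pvVecP (PySem.Str.lower m))
    ∧ (ms.map pvBucket).count "K" + (ms.map pvBucket).count "V"
        + (ms.map pvBucket).count "Z" + (ms.map pvBucket).count "L"
        = ms.countP (fun m => pvLetterP (PySem.Str.lower m) || pvZP (PySem.Str.lower m))
    ∧ (ms.map pvBucket).count "S" = ms.countP (fun m => pvSupP (PySem.Str.lower m)) := by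
  induction ms with
  | nil => simp
  | cons m t ih =>
    obtain ⟨ih1, ih2, ih3, ih4⟩ := ih
    simp only [List.map_cons, List.count_cons, List.countP_cons]
    have hb : pvBucket m = (if pvCryptoP (PySem.Str.lower m) then "K"
      else if pvVecP (PySem.Str.lower m) then "V"
      else if pvZP (PySem.Str.lower m) then "Z"
      else if pvLetterP (PySem.Str.lower m) then "L"
      else if pvSupP (PySem.Str.lower m) then "S" else "O") := rfl
    set n := PySem.Str.lower m with hn
    by_cases h1 : pvCryptoP n
    · have hz := pvCrypto_z n h1
      have hv := pvCrypto_not_vec n h1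
      have hs := pvZ_not_sup n hz
      simp only [hb, h1, if_true]
      refine ⟨?_, ?_, ?_, ?_⟩ <;> simp [h1, hv, hz, hs, ih1, ih2, ih3, ih4] <;> omega
    · by_cases h2 : pvVecP n
      · have hz := pvVec_z n h2
        have hs := pvZ_not_sup n hz
        simp only [hb, h1, h2, if_true, if_neg]
        refine ⟨?_, ?_, ?_, ?_⟩ <;> simp [h1, h2, hz, hs, ih1, ih2, ih3, ih4] <;> omega
      · by_cases h3 : pvZP n
        · have hs := pvZ_not_sup n h3
          simp only [hb, h1, h2, h3, if_true, if_neg]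
          refine ⟨?_, ?_, ?_, ?_⟩ <;> simp [h1, h2, h3, hs, ih1, ih2, ih3, ih4] <;> omega
        · by_cases h4 : pvLetterP n
          · have hs := (pvLetter_excl n h4).2.2.2
            simp only [hb, h1, h2, h3, h4, if_true, if_neg]
            refine ⟨?_, ?_, ?_, ?_⟩ <;> simp [h1, h2, h3, h4, hs, ih1, ih2, ih3, ih4] <;> omega
          · by_cases h5 : pvSupP n
            · simp only [hb, h1, h2, h3, h4, h5, if_true, if_neg]
              refine ⟨?_, ?_, ?_, ?_⟩ <;> simp [h1, h2, h3, h4, h5, ih1, ih2, ih3, ih4] <;> omega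
            · simp only [hb, h1, h2, h3, h4, h5, if_neg]
              refine ⟨?_, ?_, ?_, ?_⟩ <;> simp [h1, h2, h3, h4, h5, ih1, ih2, ih3, ih4] <;> omega

-- ===== VERDICT (by name: the statement is the Claim_ definition above) =====
theorem cluster_label_py_spec : Claim_equal_cluster_label_py := by
  intro members _
  unfold Spec_cluster_label_py cluster_label_py cluster_label_py_alt
  obtain ⟨h1, h2, h3, h4⟩ := pvCounts members
  have h1' : (((members.map pvBucket).count "K" : Int))
      = ((members.countP (fun m => pvCryptoP (PySem.Str.lower m)) : Int)) := by exact_mod_cast h1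
  have h2' : (((members.map pvBucket).count "V" : Int))
      = ((members.countP (fun m => pvVecP (PySem.Str.lower m)) : Int)) := by exact_mod_cast h2
  have h3' : (((members.map pvBucket).count "K" : Int) + ((members.map pvBucket).count "V" : Int)
        + ((members.map pvBucket).count "Z" : Int) + ((members.map pvBucket).count "L" : Int))
      = ((members.countP (fun m => pvLetterP (PySem.Str.lower m) || pvZP (PySem.Str.lower m)) : Int)) := by
    exact_mod_cast h3
  have h4' : (((members.map pvBucket).count "S" : Int))
      = ((members.countP (fun m => pvSupP (PySem.Str.lower m)) : Int)) := by exact_mod_cast h4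
  simp only [pvTally_eq, PySem.Dict.getD_counter, List.countP_map, Function.comp_def]
  rw [h3', h1', h2', h4']
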